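-- pv_equiv track=rewrite | github.com/Lisa1029/orchestro-cli | orchestro_cli/testing/tui_session.py | _parse_keys
-- ===== SOURCE A (Python) =====
-- from typing import Optional, List
--
-- def _parse_keys(keys: str) -> List[str]:
--     """Parse key sequence into individual keys.
--
--     Args:
--         keys: Key sequence string
--
--     Returns:
--         List of individual keys
--     """
--     result = []
--     i = 0
--     while i < len(keys):
--         if keys[i] == '<':
--             # Find matching >
--             end = keys.find('>', i)
--             if end != -1:
--                 result.append(keys[i:end+1])
--                 i = end + 1
--             else:
--                 result.append(keys[i])
--                 i += 1
--         else:
--             result.append(keys[i])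
--             i += 1
--     return result
-- ===== SOURCE B (Python) =====
-- from typing import List
--
-- def _parse_keys(keys: str) -> List[str]:
--     """Parse key sequence into individual keys (suffix-consuming rewrite)."""
--     tokens = []
--     rest = keys
--     while rest:
--         head, tail = rest[0], rest[1:]
--         if head == '<' and '>' in tail:
--             body, _, rest = tail.partition('>')
--             tokens.append('<' + body + '>')
--         else:
--             tokens.append(head)
--             rest = tail
--     return tokens
-- ===== Notes on version B (the rewrite author's own statement) =====
-- stated objective: alternative
-- what changed: Replaces index arithmetic (while over i, str.find from i, slice i:end+1) with a suffix-consuming loop that splits off each token with str.partition, never touching an index.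
import Mathlib
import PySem

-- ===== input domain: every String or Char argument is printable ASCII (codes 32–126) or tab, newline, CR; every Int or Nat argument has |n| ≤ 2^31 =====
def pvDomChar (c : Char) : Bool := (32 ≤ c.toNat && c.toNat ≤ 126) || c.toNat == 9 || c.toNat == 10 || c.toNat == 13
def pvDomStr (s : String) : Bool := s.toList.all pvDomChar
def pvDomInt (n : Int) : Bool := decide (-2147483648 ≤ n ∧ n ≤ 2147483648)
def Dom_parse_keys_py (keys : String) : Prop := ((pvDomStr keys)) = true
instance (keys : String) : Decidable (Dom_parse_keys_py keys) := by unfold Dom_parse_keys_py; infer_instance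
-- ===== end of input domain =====

-- B replaces A's index-scanning loop (i, str.find from i, slice i:end+1) with a
-- suffix-consuming loop using str.partition; same return value on every input.

-- ===== PORT A =====
-- A's while loop over the index i; fuel = (remaining length) only makes the
-- recursion total, each Python iteration advances i by at least 1.
def pvALoop (cs : List Char) : Nat → Nat → List (List Char)
  | 0, _ => []
  | fuel + 1, i =>
    if i < cs.length then
      if cs.getD i ' ' = '<' then
        -- end = keys.find('>', i)
        let e := PySem.Chars.findFrom cs ['>'] (i : Int) none
        if e ≠ -1 then
          PySem.Chars.slice cs (some (i : Int)) (some (e + 1)) :: pvALoop cs fuel (e.toNat + 1)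
        else
          [cs.getD i ' '] :: pvALoop cs fuel (i + 1)
      else
        [cs.getD i ' '] :: pvALoop cs fuel (i + 1)
    else []

def parse_keys_py (keys : String) : List String :=
  (pvALoop keys.toList keys.toList.length 0).map String.ofList

-- ===== PORT B =====
-- B's while loop over the remaining suffix: rest[0] / rest[1:] /
-- tail.partition('>') (= takeWhile / dropWhile at the first '>').
def pvBTok : List Char → List (List Char)
  | [] => []
  | head :: tail =>
    if head = '<' ∧ '>' ∈ tail then
      (('<' :: tail.takeWhile (· ≠ '>')) ++ ['>']) ::
        pvBTok ((tail.dropWhile (· ≠ '>')).drop 1)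
    else
      [head] :: pvBTok tail
termination_by l => l.length
decreasing_by
  · have := List.length_dropWhile_le (fun x => !decide (x = '>')) tail
    simp; omega
  · simp

def parse_keys_py_alt (keys : String) : List String :=
  (pvBTok keys.toList).map String.ofList

-- ===== PRECONDITION & SPEC =====
def Spec_parse_keys_py (keys : String) (out : List String) : Prop := out = parse_keys_py_alt keys
instance (keys : String) (out : List String) : Decidable (Spec_parse_keys_py keys out) := by unfold Spec_parse_keys_py; infer_instance

-- ===== CLAIM (what is proved, stated in full; the proofs are below) =====
def Claim_equal_parse_keys_py : Prop := ∀ (keys : String), Dom_parse_keys_py keys → Spec_parse_keys_py keys (parse_keys_py keys)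

-- ===== LEMMAS AND PROOFS =====

-- takeWhile/dropWhile split at the first position where p fails
theorem pv_tw_dw_first (p : Char → Bool) : ∀ (l : List Char) (k : Nat), (hk : k < l.length) →
    (∀ j, (hj : j < k) → p (l[j]'(by omega)) = true) → p (l[k]'hk) = false →
    l.takeWhile p = l.take k ∧ l.dropWhile p = l.drop k := by
  intro l
  induction l with
  | nil => intro k hk; simp at hk
  | cons a t ih =>
    intro k hk hpre hstop
    cases k with
    | zero => simp at hstop; simp [hstop]
    | succ k =>
      have ha : p a = true := hpre 0 (by omega)
      have := ih k (by simpa using hk) (fun j hj => hpre (j+1) (by omega)) (by simpa using hstop)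
      simp [ha, this.1, this.2]

theorem pv_singleton_prefix (x : Char) (l : List Char) :
    [x] <+: l ↔ ∃ t, l = x :: t := by
  constructor
  · rintro ⟨u, hu⟩; exact ⟨u, hu.symm⟩
  · rintro ⟨t, rfl⟩; exact ⟨t, rfl⟩

theorem pv_main : ∀ (fuel : Nat) (cs : List Char) (i : Nat), i ≤ cs.length →
    cs.length - i ≤ fuel → pvALoop cs fuel i = pvBTok (cs.drop i) := by
  intro fuel
  induction fuel with
  | zero =>
    intro cs i hi hf
    have : i = cs.length := by omega
    simp [pvALoop, this, List.drop_length, pvBTok]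
  | succ fuel ih =>
    intro cs i hi hf
    by_cases hlt : i < cs.length
    · have hdrop : cs.drop i = cs[i] :: cs.drop (i+1) := List.drop_eq_getElem_cons hlt
      have hgetD : cs.getD i ' ' = cs[i] := List.getD_eq_getElem cs ' ' hlt
      by_cases hc : cs[i] = '<'
      · -- keys[i] == '<'
        rw [pvALoop]
        simp only [hlt, if_pos, hgetD, hc]
        have hll : (cs.drop i).length = cs.length - i := List.length_drop
        have htail : (cs.drop i).drop 1 = cs.drop (i+1) := by
          rw [List.drop_drop]
        have hff : PySem.Chars.findFrom cs ['>'] (i : Int) none =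
            if PySem.Chars.find (cs.drop i) ['>'] = -1 then -1
            else (i : Int) + PySem.Chars.find (cs.drop i) ['>'] :=
          PySem.Chars.findFrom_natCast cs ['>'] i hi
        by_cases hf : PySem.Chars.find (cs.drop i) ['>'] = -1
        · -- no '>' at or after position i: both emit the single '<'
          rw [hff, if_pos hf]
          simp only [ne_eq, not_true_eq_false, if_false]
          have hnin : ('>') ∉ cs.drop i := by
            intro hm
            obtain ⟨s1, s2, hs⟩ := List.mem_iff_append.mp hm
            exact (PySem.Chars.find_eq_neg_one_iff _ ['>']).mp hf ⟨s1, s2, by simp [hs.symm]⟩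
          rw [hdrop, pvBTok]
          have hnin' : ¬ (cs[i] = '<' ∧ '>' ∈ cs.drop (i+1)) := by
            rintro ⟨-, hm⟩
            exact hnin (by rw [hdrop]; exact List.mem_cons_of_mem _ hm)
          rw [if_neg hnin', ih cs (i+1) (by omega) (by omega), hc]
        · -- first '>' at offset m from i
          have h0f : 0 ≤ PySem.Chars.find (cs.drop i) ['>'] := by
            have := PySem.Chars.neg_one_le_find (cs.drop i) ['>']; omega
          obtain ⟨hpref, hmin⟩ := PySem.Chars.find_spec h0f
          set m := (PySem.Chars.find (cs.drop i) ['>']).toNat with hmdef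
          have hfm : PySem.Chars.find (cs.drop i) ['>'] = (m : Int) := by omega
          obtain ⟨t, ht⟩ := (pv_singleton_prefix '>' ((cs.drop i).drop m)).mp hpref
          have hmlt : m < (cs.drop i).length := by
            have h1 : ((cs.drop i).drop m).length = t.length + 1 := by rw [ht]; simp
            have h2 : ((cs.drop i).drop m).length = (cs.drop i).length - m :=
              List.length_drop
            omega
          have hlm : (cs.drop i)[m]'hmlt = '>' := by
            have h0 : ((cs.drop i).drop m)[0]'(by rw [ht]; simp) = '>' := by simp [ht]
            rw [List.getElem_drop] at h0
            simpa using h0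
          have hlmq : cs[i+m]? = some '>' := by
            rw [List.getElem?_eq_getElem (by omega)]
            exact congrArg some (List.getElem_drop.symm.trans hlm)
          have hm0 : m ≠ 0 := by
            intro h0
            rw [h0] at hlmq
            simp [List.getElem?_eq_getElem hlt, hc] at hlmq
          -- positions of tail = cs.drop (i+1)
          have hidx : ∀ j : Nat, (hj : j + 1 < (cs.drop i).length) →
              (cs.drop (i+1))[j]'(by rw [← htail]; simpa [List.length_drop] using by omega)
                = (cs.drop i)[j+1]'hj := by
            intro j hj
            rw [List.getElem_drop, List.getElem_drop]
            congr 1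
            omega
          have hklt : m - 1 < (cs.drop (i+1)).length := by
            have : (cs.drop (i+1)).length = cs.length - (i+1) := List.length_drop
            omega
          have htw := pv_tw_dw_first (fun c => decide (c ≠ '>')) (cs.drop (i+1)) (m-1) hklt
            (by
              intro j hj
              have hj1 : j + 1 < (cs.drop i).length := by omega
              rw [hidx j hj1]
              have hne : (cs.drop i)[j+1]'hj1 ≠ '>' := by
                intro heq
                apply hmin (j+1) (by omega)
                have hdr : (cs.drop i).drop (j+1) =
                    (cs.drop i)[j+1]'hj1 :: (cs.drop i).drop (j+2) :=
                  List.drop_eq_getElem_cons hj1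
                rw [hdr, heq]
                exact ⟨_, rfl⟩
              simpa using hne)
            (by
              have hj1 : (m-1) + 1 < (cs.drop i).length := by omega
              rw [hidx (m-1) hj1]
              have : (cs.drop i)[(m-1)+1]'hj1 = '>' := by
                have : (m-1)+1 = m := by omega
                simp_rw [this]
                exact hlm
              simp [this])
          have hkgt : (cs.drop (i+1))[m-1]'hklt = '>' := by
            have hj1 : (m-1) + 1 < (cs.drop i).length := by omega
            rw [hidx (m-1) hj1]
            have hmm : (m-1)+1 = m := by omega
            simp_rw [hmm]
            exact hlm
          -- A's branch: end ≠ -1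
          rw [hff, if_neg hf, hfm]
          have hene : ¬ ((i : Int) + (m : Int) = -1) := by omega
          simp only [ne_eq, hene, not_false_eq_true, if_true]
          -- the token
          have hcast : (i : Int) + (m : Int) + 1 = ((i + m + 1 : Nat) : Int) := by push_cast; ring
          have htok : PySem.Chars.slice cs (some (i : Int)) (some ((i : Int) + (m : Int) + 1)) =
              '<' :: ((cs.drop (i+1)).take (m-1) ++ ['>']) := by
            rw [hcast, PySem.Chars.slice_eq_listSlice, PySem.List.slice_natCast]
            have h1 : i + m + 1 - i = m + 1 := by omega
            rw [h1, hdrop]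
            have h2 : (cs.drop (i+1)).take m = (cs.drop (i+1)).take (m-1) ++ ['>'] := by
              have hm1 : m = (m-1) + 1 := by omega
              rw [hm1, List.take_add_one]
              have : (cs.drop (i+1))[m-1]? = some '>' := by
                rw [List.getElem?_eq_getElem hklt, hkgt]
              simp [this]
            rw [List.take_succ_cons, h2, hc]
          -- the next index
          have hnext : ((i : Int) + (m : Int)).toNat + 1 = i + m + 1 := by omega
          rw [htok, hnext]
          -- B's side
          rw [hdrop, pvBTok]
          have hmem : ('>') ∈ cs.drop (i+1) := hkgt ▸ List.getElem_mem hklt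
          rw [if_pos ⟨hc, hmem⟩, htw.1, htw.2]
          have hrest : ((cs.drop (i+1)).drop (m-1)).drop 1 = cs.drop (i+m+1) := by
            rw [List.drop_drop, List.drop_drop]
            congr 1
            omega
          rw [hrest, ih cs (i+m+1) (by omega) (by omega)]
          simp
      · rw [pvALoop]
        simp only [hlt, if_pos, hgetD, hc, if_false]
        rw [hdrop, pvBTok]
        have : ¬ (cs[i] = '<' ∧ '>' ∈ cs.drop (i+1)) := fun h => hc h.1
        rw [if_neg this, ih cs (i+1) (by omega) (by omega)]
    · have : i = cs.length := by omega
      simp [pvALoop, this, List.drop_length, pvBTok]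

-- ===== VERDICT (by name: the statement is the Claim_ definition above) =====
theorem parse_keys_py_spec : Claim_equal_parse_keys_py := by
  intro keys _
  unfold Spec_parse_keys_py parse_keys_py parse_keys_py_alt
  rw [pv_main keys.toList.length keys.toList 0 (by omega) (by omega), List.drop_zero]
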